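-- pv_equiv track=rewrite | github.com/regmibishal1/AoC2021 | day10/day10p1.py | check
-- ===== SOURCE A (Python) =====
-- open_list = ["[", "{", "(", "<"]
--
-- close_list = ["]", "}", ")", ">"]
--
-- stringDict = {"]": 57, "}": 1197, ")": 3, ">": 25137}
--
-- def check(string):
--     stack = []
--     for j in string:
--         if j in open_list:
--             stack.append(j)
--         elif j in close_list:
--             ind = close_list.index(j)
--             if (len(stack) > 0) and (open_list[ind] == stack[len(stack) - 1]):
--                 stack.pop()
--             else:
--                 return stringDict[j]
--     return 0
-- ===== SOURCE B (Python) =====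
-- PAIR = {"(": ")", "[": "]", "{": "}", "<": ">"}
-- SCORE = {")": 3, "]": 57, "}": 1197, ">": 25137}
--
--
-- def check(string):
--     tag, v = _seq(string, 0)
--     if tag == 'err':
--         return v
--     if v < len(string):
--         return SCORE[string[v]]
--     return 0
--
--
-- def _seq(s, i):
--     """Consume a balanced chunk sequence starting at index i.
--
--     Returns ('ok', j) where j is len(s) or the index of the first
--     unconsumed closing bracket, or ('err', score) on the first
--     mismatched closing bracket found inside a nested chunk."""
--     while i < len(s):
--         c = s[i]
--         if c in SCORE:
--             return ('ok', i)
--         if c in PAIR: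
--             tag, v = _seq(s, i + 1)
--             if tag == 'err':
--                 return ('err', v)
--             if v >= len(s):
--                 return ('ok', v)
--             if s[v] == PAIR[c]:
--                 i = v + 1
--             else:
--                 return ('err', SCORE[s[v]])
--         else:
--             i += 1
--     return ('ok', i)
-- ===== Notes on version B (the rewrite author's own statement) =====
-- stated objective: alternative
-- what changed: Replaces A's single-pass explicit-stack scan with a recursive-descent parser: a helper consumes balanced chunks by recursion and returns the index of the first unconsumed closing bracket or the score of the first mismatched one.
import Mathlib
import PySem

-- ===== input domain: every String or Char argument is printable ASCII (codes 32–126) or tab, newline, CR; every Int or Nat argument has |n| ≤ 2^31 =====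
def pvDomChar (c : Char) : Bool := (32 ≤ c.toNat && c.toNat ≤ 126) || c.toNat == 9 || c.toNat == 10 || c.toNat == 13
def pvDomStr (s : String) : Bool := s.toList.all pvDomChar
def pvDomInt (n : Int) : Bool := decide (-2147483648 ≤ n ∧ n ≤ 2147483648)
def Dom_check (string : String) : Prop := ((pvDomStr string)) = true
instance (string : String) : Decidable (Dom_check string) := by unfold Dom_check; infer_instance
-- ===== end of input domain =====

-- B replaces A's explicit-stack scan by a recursive-descent parser over indices (alternative decomposition, same cost).

-- ===== PORT A =====
def openList : List Char := ['[', '{', '(', '<']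
def closeList : List Char := [']', '}', ')', '>']
def stringDict : PySem.Dict Char Int := PySem.Dict.ofList [(']', 57), ('}', 1197), (')', 3), ('>', 25137)]

-- the for-loop with its early returns, recursing over the remaining characters with the stack as state
def checkGo (stack : List Char) : List Char → Int
  | [] => 0
  | j :: rest =>
    if openList.contains j then checkGo (stack ++ [j]) rest
    else if closeList.contains j then
      -- close_list.index(j): always found here since j ∈ closeList, so getD 0 is never the default
      let ind : Nat := (PySem.List.index? closeList j).getD 0
      if 0 < stack.length ∧ PySem.List.pyGet? openList (ind : Int) = PySem.List.pyGet? stack ((stack.length : Int) - 1)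
      then checkGo stack.dropLast rest   -- stack.pop() on a nonempty stack drops the last element
      else (stringDict.get? j).getD 0    -- stringDict[j]: j ∈ closeList so the key is always present
    else checkGo stack rest

def check (string : String) : Int := checkGo [] string.toList

-- ===== PORT B =====
def PAIR : PySem.Dict Char Char := PySem.Dict.ofList [('(', ')'), ('[', ']'), ('{', '}'), ('<', '>')]
def SCORE : PySem.Dict Char Int := PySem.Dict.ofList [(')', 3), (']', 57), ('}', 1197), ('>', 25137)]

-- _seq: the while loop and the recursion become one fuel-indexed recursion (fuel only makes it
-- total; check_alt supplies enough fuel that the 0 case is never reached)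
def seqGo (s : List Char) : Nat → Nat → Sum Int Nat
  | 0, i => .inr i
  | f + 1, i =>
    if h : i < s.length then
      let c := s[i]
      if SCORE.contains c then .inr i
      else
        match PAIR.get? c with
        | some cl =>
          match seqGo s f (i + 1) with
          | .inl e => .inl e
          | .inr v =>
            if hv : v < s.length then
              if s[v] = cl then seqGo s f (v + 1)
              else .inl ((SCORE.get? s[v]).getD 0)   -- SCORE[s[v]]: s[v] is a closer here
            else .inr v
        | none => seqGo s f (i + 1)
    else .inr i

def check_alt (string : String) : Int :=
  let s := string.toList
  match seqGo s (s.length + 1) 0 with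
  | .inl e => e
  | .inr v => if hv : v < s.length then (SCORE.get? s[v]).getD 0 else 0

-- ===== PRECONDITION & SPEC =====
def Spec_check (string : String) (out : Int) : Prop := out = check_alt string
instance (string : String) (out : Int) : Decidable (Spec_check string out) := by unfold Spec_check; infer_instance

-- ===== CLAIM (what is proved, stated in full; the proofs are below) =====
def Claim_equal_check : Prop := ∀ (string : String), Dom_check string → Spec_check string (check string)

-- ===== LEMMAS AND PROOFS =====

-- character-class bridge lemmas between A's lists and B's dicts
lemma pair_cases (c cl : Char) (h : PAIR.get? c = some cl) :
    (c = '(' ∧ cl = ')') ∨ (c = '[' ∧ cl = ']') ∨ (c = '{' ∧ cl = '}') ∨ (c = '<' ∧ cl = '>') := by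
  rw [show PAIR = PySem.Dict.mk [('(', ')'), ('[', ']'), ('{', '}'), ('<', '>')] from rfl] at h
  simp only [PySem.Dict.get?_mk_cons] at h
  split_ifs at h <;> simp_all [@eq_comm Char, PySem.Dict.get?]

lemma score_cases (c : Char) (h : SCORE.contains c = true) :
    c = ')' ∨ c = ']' ∨ c = '}' ∨ c = '>' := by
  rw [show SCORE = PySem.Dict.mk [(')', 3), (']', 57), ('}', 1197), ('>', 25137)] from rfl] at h
  simp only [PySem.Dict.contains_mk] at h
  simpa [@eq_comm Char] using h

lemma open_of_pair (c cl : Char) (h : PAIR.get? c = some cl) : openList.contains c = true := by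
  rcases pair_cases c cl h with ⟨rfl, _⟩ | ⟨rfl, _⟩ | ⟨rfl, _⟩ | ⟨rfl, _⟩ <;> decide

lemma not_open_of_score (c : Char) (h : SCORE.contains c = true) : openList.contains c = false := by
  rcases score_cases c h with rfl | rfl | rfl | rfl <;> decide

lemma close_of_score (c : Char) (h : SCORE.contains c = true) : closeList.contains c = true := by
  rcases score_cases c h with rfl | rfl | rfl | rfl <;> decide

lemma not_open_of_none (c : Char) (h : PAIR.get? c = none) : openList.contains c = false := by
  by_cases hc : openList.contains c = true
  · exfalso
    simp only [openList, List.contains_cons, List.contains_nil, Bool.or_eq_true, beq_iff_eq] at hc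
    rcases hc with rfl | rfl | rfl | rfl | h' <;> first | (exact absurd h (by decide)) | simp_all
  · simpa using hc

lemma not_close_of_not_score (c : Char) (h : SCORE.contains c = false) : closeList.contains c = false := by
  by_cases hc : closeList.contains c = true
  · exfalso
    simp only [closeList, List.contains_cons, List.contains_nil, Bool.or_eq_true, beq_iff_eq] at hc
    rcases hc with rfl | rfl | rfl | rfl | h' <;> first | (exact absurd h (by decide)) | simp_all
  · simpa using hc

lemma score_eq_stringDict (c : Char) : stringDict.get? c = SCORE.get? c := by
  rw [show stringDict = PySem.Dict.mk [(']', 57), ('}', 1197), (')', 3), ('>', 25137)] from rfl,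
      show SCORE = PySem.Dict.mk [(')', 3), (']', 57), ('}', 1197), ('>', 25137)] from rfl]
  simp only [PySem.Dict.get?_mk_cons]
  split_ifs <;> simp_all [beq_iff_eq, @eq_comm Char, PySem.Dict.get?]

-- the top-of-stack comparison in A succeeds exactly when the closer matches the opener's pair
lemma match_iff (c cl c' : Char) (h : PAIR.get? c = some cl) (hs : SCORE.contains c' = true) :
    (PySem.List.pyGet? openList (((PySem.List.index? closeList c').getD 0 : Nat) : Int) = some c)
      ↔ c' = cl := by
  rcases pair_cases c cl h with ⟨rfl, rfl⟩ | ⟨rfl, rfl⟩ | ⟨rfl, rfl⟩ | ⟨rfl, rfl⟩ <;>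
    rcases score_cases c' hs with rfl | rfl | rfl | rfl <;> decide

-- seqGo with enough fuel returns either an error score or the index of the first
-- unconsumed character, which is past the start and (if in range) a closer
lemma seqGo_inr (s : List Char) :
    ∀ f i v, s.length - i < f → seqGo s f i = .inr v →
      i ≤ v ∧ ∀ hv : v < s.length, SCORE.contains s[v] = true := by
  intro f
  induction f with
  | zero => intro i v hf; omega
  | succ f IH =>
    intro i v hf h
    rw [seqGo] at h
    by_cases hi : i < s.length
    · rw [dif_pos hi] at h
      simp only [] at h
      by_cases hs : SCORE.contains s[i] = true
      · rw [if_pos hs] at h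
        simp only [Sum.inr.injEq] at h
        subst h
        exact ⟨le_refl _, fun _ => hs⟩
      · rw [if_neg hs] at h
        cases hp : PAIR.get? s[i] with
        | none =>
          simp only [hp] at h
          have := IH (i + 1) v (by omega) h
          exact ⟨by omega, this.2⟩
        | some cl =>
          simp only [hp] at h
          cases hrec : seqGo s f (i + 1) with
          | inl e => simp only [hrec] at h; cases h
          | inr w =>
            simp only [hrec] at h
            have hw := IH (i + 1) w (by omega) hrec
            by_cases hwlen : w < s.length
            · rw [dif_pos hwlen] at h
              by_cases hm : s[w] = cl
              · rw [if_pos hm] at h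
                have := IH (w + 1) v (by omega) h
                exact ⟨by omega, this.2⟩
              · rw [if_neg hm] at h; cases h
            · rw [dif_neg hwlen] at h
              simp only [Sum.inr.injEq] at h
              subst h
              exact ⟨by omega, fun hv => absurd hv hwlen⟩
    · rw [dif_neg hi] at h
      simp only [Sum.inr.injEq] at h
      subst h
      exact ⟨le_refl _, fun hv => absurd hv hi⟩

-- unfolding equations for A's loop body
lemma checkGo_nil (stack : List Char) : checkGo stack [] = 0 := by rw [checkGo]

lemma checkGo_cons (stack : List Char) (j : Char) (rest : List Char) :
    checkGo stack (j :: rest) =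
      if openList.contains j then checkGo (stack ++ [j]) rest
      else if closeList.contains j then
        if 0 < stack.length ∧ PySem.List.pyGet? openList (((PySem.List.index? closeList j).getD 0 : Nat) : Int) = PySem.List.pyGet? stack ((stack.length : Int) - 1)
        then checkGo stack.dropLast rest
        else (stringDict.get? j).getD 0
      else checkGo stack rest := by
  rw [checkGo]

-- the top of stack ++ [c]
lemma pyGet_last_append (stack : List Char) (c : Char) :
    PySem.List.pyGet? (stack ++ [c]) (((stack ++ [c]).length : Int) - 1) = some c := by
  have h1 : ((stack ++ [c]).length : Int) - 1 = ((stack.length : Nat) : Int) := by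
    simp [List.length_append]
  rw [h1, PySem.List.pyGet?_natCast]
  simp

-- main invariant: A's loop on the suffix from i equals resolving B's parser result
lemma main_inv (s : List Char) :
    ∀ f i stack, s.length - i < f →
      checkGo stack (s.drop i) =
        (match seqGo s f i with
          | .inl e => e
          | .inr v => checkGo stack (s.drop v)) := by
  intro f
  induction f with
  | zero => intro i stack hf; omega
  | succ f IH =>
    intro i stack hf
    by_cases hi : i < s.length
    · have hdrop : s.drop i = s[i] :: s.drop (i + 1) := List.drop_eq_getElem_cons hi
      by_cases hs : SCORE.contains s[i] = true
      · have hval : seqGo s (f + 1) i = .inr i := by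
          rw [seqGo, dif_pos hi]; simp only []; rw [if_pos hs]
        rw [hval]
      · cases hp : PAIR.get? s[i] with
        | none =>
          have hval : seqGo s (f + 1) i = seqGo s f (i + 1) := by
            rw [seqGo, dif_pos hi]; simp only []; rw [if_neg hs]; simp only [hp]
          rw [hval, hdrop, checkGo_cons, if_neg (by rw [not_open_of_none _ hp]; simp),
              if_neg (by rw [not_close_of_not_score _ (by simpa using hs)]; simp)]
          exact IH (i + 1) stack (by omega)
        | some cl =>
          have hopen : openList.contains s[i] = true := open_of_pair _ _ hp
          rw [hdrop, checkGo_cons, if_pos hopen, IH (i + 1) (stack ++ [s[i]]) (by omega)]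
          cases hrec : seqGo s f (i + 1) with
          | inl e =>
            have hval : seqGo s (f + 1) i = .inl e := by
              rw [seqGo, dif_pos hi]; simp only []; rw [if_neg hs]; simp only [hp, hrec]
            rw [hval]
          | inr w =>
            simp only []
            obtain ⟨hwge, hwsc⟩ := seqGo_inr s f (i + 1) w (by omega) hrec
            by_cases hw : w < s.length
            · have hcw := hwsc hw
              have hwdrop : s.drop w = s[w] :: s.drop (w + 1) := List.drop_eq_getElem_cons hw
              rw [hwdrop, checkGo_cons, if_neg (by rw [not_open_of_score _ hcw]; simp),
                  if_pos (close_of_score _ hcw)]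
              have hlast := pyGet_last_append stack s[i]
              have hcond_iff :
                  (0 < (stack ++ [s[i]]).length ∧
                    PySem.List.pyGet? openList (((PySem.List.index? closeList s[w]).getD 0 : Nat) : Int)
                      = PySem.List.pyGet? (stack ++ [s[i]]) (((stack ++ [s[i]]).length : Int) - 1))
                    ↔ s[w] = cl := by
                rw [hlast]
                constructor
                · intro hc
                  exact (match_iff s[i] cl s[w] hp hcw).mp hc.2
                · intro hm
                  exact ⟨by simp, (match_iff s[i] cl s[w] hp hcw).mpr hm⟩
              by_cases hm : s[w] = cl
              · rw [if_pos (hcond_iff.mpr hm)]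
                have hdl : (stack ++ [s[i]]).dropLast = stack := by simp
                have hval : seqGo s (f + 1) i = seqGo s f (w + 1) := by
                  rw [seqGo, dif_pos hi]; simp only []; rw [if_neg hs]
                  simp only [hp, hrec]; rw [dif_pos hw, if_pos hm]
                rw [hdl, hval]
                exact IH (w + 1) stack (by omega)
              · rw [if_neg (fun hc => hm (hcond_iff.mp hc))]
                have hval : seqGo s (f + 1) i = .inl ((SCORE.get? s[w]).getD 0) := by
                  rw [seqGo, dif_pos hi]; simp only []; rw [if_neg hs]
                  simp only [hp, hrec]; rw [dif_pos hw, if_neg hm]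
                rw [hval, score_eq_stringDict]
            · have hnil : s.drop w = [] := List.drop_eq_nil_of_le (by omega)
              have hval : seqGo s (f + 1) i = .inr w := by
                rw [seqGo, dif_pos hi]; simp only []; rw [if_neg hs]
                simp only [hp, hrec]; rw [dif_neg hw]
              rw [hnil, checkGo_nil, hval]
              simp only [hnil, checkGo_nil]
    · have hval : seqGo s (f + 1) i = .inr i := by rw [seqGo, dif_neg hi]
      rw [hval]

-- ===== VERDICT (by name: the statement is the Claim_ definition above) =====
theorem check_spec : Claim_equal_check := by
  intro string _
  unfold Spec_check check check_alt
  simp only []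
  have h := main_inv string.toList (string.toList.length + 1) 0 [] (by omega)
  simp only [List.drop_zero] at h
  rw [h]
  cases hv : seqGo string.toList (string.toList.length + 1) 0 with
  | inl e => simp only []
  | inr v =>
    simp only []
    obtain ⟨-, hsc⟩ := seqGo_inr string.toList (string.toList.length + 1) 0 v (by omega) hv
    by_cases hvl : v < string.toList.length
    · have hcw := hsc hvl
      have hvdrop : string.toList.drop v = string.toList[v] :: string.toList.drop (v + 1) :=
        List.drop_eq_getElem_cons hvl
      rw [dif_pos hvl, hvdrop, checkGo_cons, if_neg (by rw [not_open_of_score _ hcw]; simp),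
          if_pos (close_of_score _ hcw), if_neg (by simp), score_eq_stringDict]
    · rw [dif_neg hvl, List.drop_eq_nil_of_le (by omega), checkGo_nil]
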